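-- pv_equiv track=rewrite | github.com/ntnhan0605/docs-ntnhan0605 | algorithm/bigo_blue50/01-dynamic_array-string/big_segment.py | big_segment
-- ===== SOURCE A (Python) =====
-- def max_big_segment(arr, n):
-- 	idxBigSgm = -1
-- 	bigSegment = [9_999, 0]
-- 	for i in range(n):
-- 		[l, r] = bigSegment
-- 		[li, ri] = arr[i]
-- 		if r - l < ri - li:
-- 			bigSegment[0] = li
-- 			bigSegment[1] = ri
-- 			idxBigSgm = i
-- 	return idxBigSgm
--
-- def big_segment(arr, n):
-- 	idxBigSgm = max_big_segment(arr, n)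
-- 	if idxBigSgm == -1:
-- 		return -1
-- 	[l, r] = arr[idxBigSgm]
-- 	count = 0
-- 	for i in range(n):
-- 		[li, ri] = arr[i]
-- 		if l <= li and li <= ri and ri <= r:
-- 			count += 1
-- 	return idxBigSgm + 1 if count == n else -1
-- ===== SOURCE B (Python) =====
-- def big_segment(arr, n):
--     idx = -1
--     best_w = -9999
--     min_l = None
--     max_r = None
--     ok = True
--     for i in range(n):
--         [li, ri] = arr[i]
--         if best_w < ri - li:
--             best_w = ri - li
--             idx = i
--         if min_l is None or li < min_l:
--             min_l = li
--         if max_r is None or max_r < ri: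
--             max_r = ri
--         if ri < li:
--             ok = False
--     if idx == -1:
--         return -1
--     [l, r] = arr[idx]
--     return idx + 1 if ok and l <= min_l and max_r <= r else -1
-- ===== Notes on version B (the rewrite author's own statement) =====
-- stated objective: alternative
-- what changed: B fuses A's two passes into one loop and replaces the containment-counting second pass by min/max/well-formedness aggregates: the widest segment contains all others iff l <= min li, max ri <= r and every li <= ri.
import Mathlib
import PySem

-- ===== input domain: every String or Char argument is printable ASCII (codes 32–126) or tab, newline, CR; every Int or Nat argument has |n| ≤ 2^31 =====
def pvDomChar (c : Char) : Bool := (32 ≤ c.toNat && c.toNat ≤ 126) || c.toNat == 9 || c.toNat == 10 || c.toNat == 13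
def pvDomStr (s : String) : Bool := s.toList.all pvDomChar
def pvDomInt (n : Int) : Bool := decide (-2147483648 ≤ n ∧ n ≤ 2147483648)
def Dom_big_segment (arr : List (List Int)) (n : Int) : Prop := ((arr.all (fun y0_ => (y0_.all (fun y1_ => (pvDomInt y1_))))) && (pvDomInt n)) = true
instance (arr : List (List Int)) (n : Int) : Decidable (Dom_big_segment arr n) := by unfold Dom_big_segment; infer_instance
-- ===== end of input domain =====

-- B fuses A's two passes into one loop and replaces the containment count by
-- min/max/well-formedness aggregates (alternative decomposition, same cost).

-- ===== PORT A =====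
-- one iteration of max_big_segment's loop; state (idxBigSgm, l, r)
def pvMaxStep (arr : List (List Int)) (s : Int × Int × Int) (i : Int) : Int × Int × Int :=
  match PySem.List.pyGetD arr i [] with
  | [li, ri] => if s.2.2 - s.2.1 < ri - li then (i, li, ri) else s
  | _ => s  -- Python raises on unpack here; outside Pre_

def max_big_segment (arr : List (List Int)) (n : Int) : Int :=
  ((PySem.List.pyRange 0 n 1).foldl (pvMaxStep arr) (-1, 9999, 0)).1

-- one iteration of big_segment's counting loop, on the fetched element
def pvCountE (l r : Int) (c : Int) (e : List Int) : Int :=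
  match e with
  | [li, ri] => if l ≤ li ∧ li ≤ ri ∧ ri ≤ r then c + 1 else c
  | _ => c  -- Python raises on unpack here; outside Pre_

def big_segment (arr : List (List Int)) (n : Int) : Int :=
  let idxBigSgm := max_big_segment arr n
  if idxBigSgm = -1 then -1
  else
    match PySem.List.pyGetD arr idxBigSgm [] with
    | [l, r] =>
      let count := (PySem.List.pyRange 0 n 1).foldl
        (fun c i => pvCountE l r c (PySem.List.pyGetD arr i [])) 0
      if count = n then idxBigSgm + 1 else -1
    | _ => -1  -- Python raises on unpack here; outside Pre_

-- ===== PORT B =====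
-- one iteration of B's fused loop; state (idx, best_w, min_l, max_r, ok)
def pvAltStep (arr : List (List Int)) (s : Int × Int × Option Int × Option Int × Bool)
    (i : Int) : Int × Int × Option Int × Option Int × Bool :=
  match PySem.List.pyGetD arr i [] with
  | [li, ri] =>
    let ib : Int × Int := if s.2.1 < ri - li then (i, ri - li) else (s.1, s.2.1)
    let minl : Option Int := match s.2.2.1 with
      | none => some li
      | some m => if li < m then some li else some m
    let maxr : Option Int := match s.2.2.2.1 with
      | none => some ri
      | some M => if M < ri then some ri else some M
    let ok : Bool := if ri < li then false else s.2.2.2.2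
    (ib.1, ib.2, minl, maxr, ok)
  | _ => s  -- Python raises on unpack here; outside Pre_

def big_segment_alt (arr : List (List Int)) (n : Int) : Int :=
  let s := (PySem.List.pyRange 0 n 1).foldl (pvAltStep arr) (-1, -9999, none, none, true)
  if s.1 = -1 then -1
  else
    match PySem.List.pyGetD arr s.1 [] with
    | [l, r] =>
      match s.2.2.1, s.2.2.2.1 with
      | some m, some M => if s.2.2.2.2 && decide (l ≤ m) && decide (M ≤ r) then s.1 + 1 else -1
      | _, _ => -1  -- unreachable inside Pre_ when idx ≠ -1 (Python would compare with None)
    | _ => -1  -- Python raises on unpack here; outside Pre_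

-- ===== PRECONDITION & SPEC =====
-- Pre_ excludes exactly the inputs where Python raises: an index below n beyond the end of
-- arr (IndexError) or a visited element that is not a 2-element list (unpacking ValueError).
def Pre_big_segment (arr : List (List Int)) (n : Int) : Prop :=
  n ≤ (arr.length : Int) ∧ ∀ e ∈ arr.take n.toNat, e.length = 2

instance (arr : List (List Int)) (n : Int) : Decidable (Pre_big_segment arr n) := by
  unfold Pre_big_segment; infer_instance

def pvWitness_big_segment : List (List Int) × Int := ([[1, 5], [2, 3], [0, 9]], 3)

def Spec_big_segment (arr : List (List Int)) (n : Int) (out : Int) : Prop := out = big_segment_alt arr n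
instance (arr : List (List Int)) (n : Int) (out : Int) : Decidable (Spec_big_segment arr n out) := by unfold Spec_big_segment; infer_instance

-- ===== CLAIM (what is proved, stated in full; the proofs are below) =====
def Claim_equal_big_segment : Prop := ∀ (arr : List (List Int)) (n : Int), Dom_big_segment arr n → Pre_big_segment arr n → Spec_big_segment arr n (big_segment arr n)

-- ===== LEMMAS AND PROOFS =====
def pvFst (e : List Int) : Int := e.getD 0 0
def pvSnd (e : List Int) : Int := e.getD 1 0

-- aggregate step on the fetched element (the (min_l, max_r, ok) part of pvAltStep)
def pvAggE (t : Option Int × Option Int × Bool) (e : List Int) : Option Int × Option Int × Bool :=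
  match e with
  | [li, ri] =>
    (match t.1 with
      | none => some li
      | some m => if li < m then some li else some m,
     match t.2.1 with
      | none => some ri
      | some M => if M < ri then some ri else some M,
     if ri < li then false else t.2.2)
  | _ => t

-- L1: the (idx, best_w) part of B's fused fold tracks A's (idx, l, r) fold
theorem pvL1 (arr : List (List Int)) : ∀ (is : List Int) (idx l r : Int)
    (m M : Option Int) (ok : Bool),
    ((is.foldl (pvAltStep arr) (idx, r - l, m, M, ok)).1 =
      (is.foldl (pvMaxStep arr) (idx, l, r)).1) ∧
    ((is.foldl (pvAltStep arr) (idx, r - l, m, M, ok)).2.2 =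
      is.foldl (fun t i => pvAggE t (PySem.List.pyGetD arr i [])) (m, M, ok)) := by
  intro is
  induction is with
  | nil => intro idx l r m M ok; exact ⟨rfl, rfl⟩
  | cons i t ih =>
    intro idx l r m M ok
    simp only [List.foldl_cons]
    rcases hget : PySem.List.pyGetD arr i [] with _ | ⟨li, _ | ⟨ri, _ | ⟨x, t'⟩⟩⟩ <;>
      simp only [pvMaxStep, pvAltStep, pvAggE, hget]
    · exact ih idx l r m M ok
    · exact ih idx l r m M ok
    · by_cases hc : r - l < ri - li
      · simp only [hc, if_pos]
        exact ih i li ri _ _ _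
      · simp only [hc, if_false]
        exact ih idx l r _ _ _
    · exact ih idx l r m M ok

-- L3: a fold over range(n) fetching arr[i] is a fold over arr.take n.toNat
theorem pvL3 {β : Type} (arr : List (List Int)) (n : Int) (g : β → List Int → β) (init : β)
    (hn : n ≤ (arr.length : Int)) :
    (PySem.List.pyRange 0 n 1).foldl (fun acc i => g acc (PySem.List.pyGetD arr i [])) init =
      (arr.take n.toNat).foldl g init := by
  by_cases h0 : n ≤ 0
  · rw [PySem.List.pyRange_one_eq_nil h0]
    have hz : n.toNat = 0 := by omega
    simp [hz]
  · replace h0 : 0 < n := by omega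
    have hlenN : (arr.take n.toNat).length = n.toNat := by
      simp; omega
    have hlen : ((arr.take n.toNat).length : Int) = n := by rw [hlenN]; omega
    have hbase := PySem.List.foldl_pyRange_zero_pyGetD' (arr.take n.toNat) [] g init
    rw [hlen] at hbase
    rw [← hbase]
    refine PySem.List.foldl_congr_mem _ _ _ _ (fun acc i hi => ?_)
    rw [PySem.List.mem_pyRange_one] at hi
    have hi2 : i < ((arr.take n.toNat).length : Int) := by omega
    have hi3 : i < (arr.length : Int) := by
      have : n ≤ (arr.length : Int) := hn
      omega
    rw [PySem.List.pyGetD_eq_getElem arr [] hi.1 hi3,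
      PySem.List.pyGetD_eq_getElem (arr.take n.toNat) [] hi.1 hi2,
      List.getElem_take]

-- L4: the counting loop counts the elements satisfying the containment predicate
theorem pvL4 (l r : Int) (xs : List (List Int)) (h2 : ∀ e ∈ xs, e.length = 2) :
    xs.foldl (pvCountE l r) 0 =
      ((xs.countP (fun e => decide (l ≤ pvFst e ∧ pvFst e ≤ pvSnd e ∧ pvSnd e ≤ r)) : Int)) := by
  rw [PySem.List.foldl_congr_mem xs (pvCountE l r)
      (fun (c : Int) e => if l ≤ pvFst e ∧ pvFst e ≤ pvSnd e ∧ pvSnd e ≤ r then c + 1 else c) 0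
      (fun c e he => by
        have h := h2 e he
        rcases e with _ | ⟨a, _ | ⟨b, _ | ⟨c', t'⟩⟩⟩
        · simp at h
        · simp at h
        · simp [pvCountE, pvFst, pvSnd]
        · simp at h),
    PySem.List.foldl_ite_add_one]
  simp

-- L5: the aggregate fold from a some-state computes running min / max / all-ok
theorem pvL5 (xs : List (List Int)) : (∀ e ∈ xs, e.length = 2) → ∀ (m M : Int) (ok : Bool),
    xs.foldl pvAggE (some m, some M, ok) =
      (some (xs.foldl (fun a e => min a (pvFst e)) m),
       some (xs.foldl (fun a e => max a (pvSnd e)) M),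
       ok && xs.all (fun e => decide (pvFst e ≤ pvSnd e))) := by
  induction xs with
  | nil => intro _ m M ok; simp
  | cons e t ih =>
    intro h2 m M ok
    have he := h2 e List.mem_cons_self
    have h2' : ∀ x ∈ t, x.length = 2 := fun x hx => h2 x (List.mem_cons_of_mem _ hx)
    rcases e with _ | ⟨a, _ | ⟨b, _ | ⟨c', t'⟩⟩⟩ <;> simp at he
    have e1 : (if a < m then some a else some m) = some (min m a) := by
      split_ifs with h <;> simp [min_def] <;> omega
    have e2 : (if M < b then some b else some M) = some (max M b) := by
      split_ifs with h <;> simp [max_def] <;> omega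
    have e3 : (if b < a then false else ok) = (ok && decide (a ≤ b)) := by
      split_ifs with h <;> simp <;> omega
    simp only [List.foldl_cons, pvAggE, e1, e2, e3, ih h2', List.all_cons, pvFst, pvSnd,
      List.getD, Bool.and_assoc]
    simp

theorem pv_le_foldl_min_iff (l : Int) (xs : List (List Int)) :
    ∀ m : Int, (l ≤ xs.foldl (fun a e => min a (pvFst e)) m ↔ l ≤ m ∧ ∀ e ∈ xs, l ≤ pvFst e) := by
  induction xs with
  | nil => simp
  | cons e t ih =>
    intro m
    simp only [List.foldl_cons, ih, le_min_iff, List.forall_mem_cons]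
    tauto

theorem pv_foldl_max_le_iff (r : Int) (xs : List (List Int)) :
    ∀ M : Int, (xs.foldl (fun a e => max a (pvSnd e)) M ≤ r ↔ M ≤ r ∧ ∀ e ∈ xs, pvSnd e ≤ r) := by
  induction xs with
  | nil => simp
  | cons e t ih =>
    intro M
    simp only [List.foldl_cons, ih, max_le_iff, List.forall_mem_cons]
    tauto

-- ===== VERDICT (by name: the statement is the Claim_ definition above) =====
theorem big_segment_spec : Claim_equal_big_segment := by
  intro arr n _ hpre
  obtain ⟨hn, h2⟩ := hpre
  unfold Spec_big_segment
  have h1 := pvL1 arr (PySem.List.pyRange 0 n 1) (-1) 9999 0 none none true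
  norm_num at h1
  obtain ⟨hidx, hagg⟩ := h1
  simp only [big_segment, big_segment_alt, max_big_segment]
  rw [hidx]
  by_cases hA : (List.foldl (pvMaxStep arr) (-1, 9999, 0) (PySem.List.pyRange 0 n 1)).1 = -1
  · simp [hA]
  · simp only [hA, if_false]
    have hpos : 0 < n := by
      by_contra hneg
      rw [PySem.List.pyRange_one_eq_nil (by omega : n ≤ 0)] at hA
      simp at hA
    rcases hget : PySem.List.pyGetD arr
        (List.foldl (pvMaxStep arr) (-1, 9999, 0) (PySem.List.pyRange 0 n 1)).1 [] with
      _ | ⟨l, _ | ⟨r, _ | ⟨x, t'⟩⟩⟩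
    · rfl
    · rfl
    · -- the interesting case: arr[idx] = [l, r]
      have hcount : (PySem.List.pyRange 0 n 1).foldl
          (fun c i => pvCountE l r c (PySem.List.pyGetD arr i [])) 0 =
          (((arr.take n.toNat).countP
            (fun e => decide (l ≤ pvFst e ∧ pvFst e ≤ pvSnd e ∧ pvSnd e ≤ r)) : Int)) := by
        rw [pvL3 arr n (pvCountE l r) 0 hn]
        exact pvL4 l r _ h2
      have haggxs : (List.foldl (pvAltStep arr) (-1, -9999, none, none, true)
            (PySem.List.pyRange 0 n 1)).2.2 =
          (arr.take n.toNat).foldl pvAggE (none, none, true) := by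
        rw [hagg]; exact pvL3 arr n pvAggE (none, none, true) hn
      have hlen : (((arr.take n.toNat).length : Int)) = n := by simp; omega
      rcases hxs : arr.take n.toNat with _ | ⟨e0, t⟩
      · rw [hxs] at hlen; simp at hlen; omega
      · rw [hxs] at hcount haggxs hlen
        have h2' : ∀ e ∈ e0 :: t, e.length = 2 := by rw [← hxs]; exact h2
        have he0 := h2' e0 List.mem_cons_self
        have h2t : ∀ e ∈ t, e.length = 2 := fun e he => h2' e (List.mem_cons_of_mem _ he)
        rcases e0 with _ | ⟨a, _ | ⟨b, _ | ⟨c', t''⟩⟩⟩ <;> simp at he0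
        have hok0 : (if b < a then false else true) = decide (a ≤ b) := by
          split_ifs with h <;> simp <;> omega
        have hfold : (a :: b :: []) :: t = [a, b] :: t := rfl
        rw [List.foldl_cons] at haggxs
        have hstep : pvAggE (none, none, true) [a, b] = (some a, some b, decide (a ≤ b)) := by
          simp [pvAggE, hok0]
        rw [hstep, pvL5 t h2t a b (decide (a ≤ b))] at haggxs
        -- reduce the match on B's side
        rw [haggxs]
        simp only []
        -- now both sides are ifs over the same index; compare the conditions
        rw [hcount]
        have hiffL : ((([a, b] :: t).countP
              (fun e => decide (l ≤ pvFst e ∧ pvFst e ≤ pvSnd e ∧ pvSnd e ≤ r)) : Int) = n) ↔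
            (∀ e ∈ [a, b] :: t, l ≤ pvFst e ∧ pvFst e ≤ pvSnd e ∧ pvSnd e ≤ r) := by
          constructor
          · intro h
            have hle : ([a, b] :: t).countP
                (fun e => decide (l ≤ pvFst e ∧ pvFst e ≤ pvSnd e ∧ pvSnd e ≤ r)) ≤
                ([a, b] :: t).length := List.countP_le_length
            have heq : ([a, b] :: t).countP
                (fun e => decide (l ≤ pvFst e ∧ pvFst e ≤ pvSnd e ∧ pvSnd e ≤ r)) =
                ([a, b] :: t).length := by omega
            intro e he
            simpa using List.countP_eq_length.mp heq e he
          · intro h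
            have heq : ([a, b] :: t).countP
                (fun e => decide (l ≤ pvFst e ∧ pvFst e ≤ pvSnd e ∧ pvSnd e ≤ r)) =
                ([a, b] :: t).length :=
              List.countP_eq_length.mpr (fun e he => by simpa using h e he)
            omega
        have hiffR : ((decide (a ≤ b) && t.all (fun e => decide (pvFst e ≤ pvSnd e))) &&
              decide (l ≤ t.foldl (fun acc e => min acc (pvFst e)) a) &&
              decide (t.foldl (fun acc e => max acc (pvSnd e)) b ≤ r)) = true ↔
            (∀ e ∈ [a, b] :: t, l ≤ pvFst e ∧ pvFst e ≤ pvSnd e ∧ pvSnd e ≤ r) := by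
          simp only [Bool.and_eq_true, decide_eq_true_eq, List.all_eq_true,
            pv_le_foldl_min_iff, pv_foldl_max_le_iff, List.forall_mem_cons]
          simp [pvFst, pvSnd]
          constructor
          · rintro ⟨⟨⟨h1, h2⟩, h3, h4⟩, h5, h6⟩
            exact ⟨⟨h3, h1, h5⟩, fun e he => ⟨h4 e he, h2 e he, h6 e he⟩⟩
          · rintro ⟨⟨h1, h2, h3⟩, h4⟩
            exact ⟨⟨⟨h2, fun e he => (h4 e he).2.1⟩, h1, fun e he => (h4 e he).1⟩,
              h3, fun e he => (h4 e he).2.2⟩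
        by_cases hcc : ((([a, b] :: t).countP
            (fun e => decide (l ≤ pvFst e ∧ pvFst e ≤ pvSnd e ∧ pvSnd e ≤ r)) : Int) = n)
        · rw [if_pos hcc, if_pos (hiffR.mpr (hiffL.mp hcc))]
        · rw [if_neg hcc, if_neg (fun hc => hcc (hiffL.mpr (hiffR.mp hc)))]
    · rfl
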